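-- pv_equiv track=rewrite | github.com/AnandPandey/Nexus | app.py | snippet
-- ===== SOURCE A (Python) =====
-- def snippet(body: str, query_tokens: list[str], length: int = 200) -> str:
--     """Extract a relevant snippet around the first query term hit."""
--     if not body:
--         return ""
--     lower = body.lower()
--     best_pos = len(body)
--     for t in query_tokens:
--         pos = lower.find(t)
--         if 0 <= pos < best_pos:
--             best_pos = pos
--     start = max(0, best_pos - 80)
--     end = min(len(body), start + length)
--     chunk = body[start:end].strip()
--     if start > 0:
--         chunk = "…" + chunk
--     if end < len(body):
--         chunk = chunk + "…"
--     return chunk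
-- ===== SOURCE B (Python) =====
-- def _first_hit(lower, n, query_tokens):
--     """Leftmost index i in [0, n) where some token starts at i; n if none."""
--     i = 0
--     while i < n:
--         if any(lower.startswith(t, i) for t in query_tokens):
--             return i
--         i += 1
--     return n
--
--
-- def snippet(body: str, query_tokens: list[str], length: int = 200) -> str:
--     """Extract a relevant snippet around the first query term hit.
--
--     One left-to-right scan stopping at the first position where ANY token
--     matches, instead of a full .find() pass per token; the tail is built
--     as a single three-part concatenation.
--     """
--     if not body:
--         return ""
--     n = len(body)
--     best_pos = _first_hit(body.lower(), n, query_tokens)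
--     start = best_pos - 80 if best_pos > 80 else 0
--     end = start + length if start + length < n else n
--     return (("…" if start > 0 else "")
--             + body[start:end].strip()
--             + ("…" if end < n else ""))
-- ===== Notes on version B (the rewrite author's own statement) =====
-- stated objective: alternative
-- what changed: A runs one full lower.find(t) scan per token and folds the minimum; B does a single left-to-right position scan (a while loop in a helper) that stops at the first index where any token starts (str.startswith with an offset), and builds the result as one three-part concatenation with conditional-expression start/end instead of A's max/min and two sequential chunk rewrites.
import Mathlib
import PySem

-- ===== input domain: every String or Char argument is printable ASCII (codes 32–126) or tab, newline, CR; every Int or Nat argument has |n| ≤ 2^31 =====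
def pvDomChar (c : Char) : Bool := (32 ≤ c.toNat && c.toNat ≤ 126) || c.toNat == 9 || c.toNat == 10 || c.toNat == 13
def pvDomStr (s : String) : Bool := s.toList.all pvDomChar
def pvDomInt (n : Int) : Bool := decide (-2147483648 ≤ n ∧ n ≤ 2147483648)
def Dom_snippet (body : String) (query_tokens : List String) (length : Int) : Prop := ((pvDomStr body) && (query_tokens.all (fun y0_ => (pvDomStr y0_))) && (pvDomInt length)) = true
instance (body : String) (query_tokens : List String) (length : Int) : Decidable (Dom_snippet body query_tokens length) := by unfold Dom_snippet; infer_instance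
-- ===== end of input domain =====

-- B replaces A's one-full-`find`-scan-per-token minimum fold with a single left-to-right
-- position scan that stops at the first index where any token starts, and assembles the
-- result as one three-part concatenation (objective: alternative).

-- ===== PORT A =====
def snippet (body : String) (query_tokens : List String) (length : Int) : String :=
  if body = "" then ""
  else
    let lower := PySem.Str.lower body
    let bestPos : Int := query_tokens.foldl (fun best t =>
      let pos := PySem.Str.find lower t
      if 0 ≤ pos ∧ pos < best then pos else best) (PySem.Str.len body)
    let start := max 0 (bestPos - 80)
    let stop := min (PySem.Str.len body) (start + length)
    let chunk := PySem.Str.strip (PySem.Str.slice body (some start) (some stop))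
    let chunk := if start > 0 then "…" ++ chunk else chunk
    let chunk := if stop < (PySem.Str.len body) then chunk ++ "…" else chunk
    chunk

-- ===== PORT B =====
-- Source B's `_first_hit` while loop; the loop counter is encoded as the remaining fuel
-- n - i (structural recursion), so `i < n` is exactly `fuel > 0`; `lower.startswith(t, i)`
-- for 0 ≤ i is exactly "t.toList is a prefix of the character list dropped by i"
-- (lower() preserves the length, so n = l.length).
def snippetAltFirstHit (l : List Char) (toks : List String) : Nat → Nat → Nat
  | _, 0 => l.length
  | i, k + 1 =>
    if toks.any (fun t => t.toList.isPrefixOf (l.drop i)) then i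
    else snippetAltFirstHit l toks (i + 1) k

def snippet_alt (body : String) (query_tokens : List String) (length : Int) : String :=
  if body = "" then ""
  else
    let n : Int := PySem.Str.len body
    let bestPos : Int :=
      (snippetAltFirstHit (PySem.Str.lower body).toList query_tokens 0
        (PySem.Str.lower body).toList.length : Nat)
    let start : Int := if bestPos > 80 then bestPos - 80 else 0
    let stop : Int := if start + length < n then start + length else n
    (if start > 0 then "…" else "") ++
      PySem.Str.strip (PySem.Str.slice body (some start) (some stop)) ++
      (if stop < n then "…" else "")

-- ===== PRECONDITION & SPEC =====
def Spec_snippet (body : String) (query_tokens : List String) (length : Int) (out : String) : Prop := out = snippet_alt body query_tokens length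
instance (body : String) (query_tokens : List String) (length : Int) (out : String) : Decidable (Spec_snippet body query_tokens length out) := by unfold Spec_snippet; infer_instance

-- ===== CLAIM (what is proved, stated in full; the proofs are below) =====
def Claim_equal_snippet : Prop := ∀ (body : String) (query_tokens : List String) (length : Int), Dom_snippet body query_tokens length → Spec_snippet body query_tokens length (snippet body query_tokens length)

-- ===== LEMMAS AND PROOFS =====

-- A's token-minimum fold: it only decreases, ends at the initial value or at a found
-- position, and is a lower bound of every found position.
theorem foldA_spec (s : String) (toks : List String) (acc : Int) :
    (toks.foldl (fun best t =>
      let pos := PySem.Str.find s t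
      if 0 ≤ pos ∧ pos < best then pos else best) acc) ≤ acc ∧
    ((toks.foldl (fun best t =>
      let pos := PySem.Str.find s t
      if 0 ≤ pos ∧ pos < best then pos else best) acc) = acc ∨
      ∃ t ∈ toks, 0 ≤ PySem.Str.find s t ∧
        (toks.foldl (fun best t =>
          let pos := PySem.Str.find s t
          if 0 ≤ pos ∧ pos < best then pos else best) acc) = PySem.Str.find s t) ∧
    (∀ t ∈ toks, 0 ≤ PySem.Str.find s t →
      (toks.foldl (fun best t =>
        let pos := PySem.Str.find s t
        if 0 ≤ pos ∧ pos < best then pos else best) acc) ≤ PySem.Str.find s t) := by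
  induction toks generalizing acc with
  | nil => refine ⟨le_refl _, Or.inl rfl, ?_⟩; intro t ht; simp at ht
  | cons t ts ih =>
    simp only [List.foldl_cons]
    have hstep : (if 0 ≤ PySem.Str.find s t ∧ PySem.Str.find s t < acc then PySem.Str.find s t else acc) ≤ acc ∧
        ((if 0 ≤ PySem.Str.find s t ∧ PySem.Str.find s t < acc then PySem.Str.find s t else acc) = acc ∨
          (0 ≤ PySem.Str.find s t ∧ (if 0 ≤ PySem.Str.find s t ∧ PySem.Str.find s t < acc then PySem.Str.find s t else acc) = PySem.Str.find s t)) ∧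
        (0 ≤ PySem.Str.find s t → (if 0 ≤ PySem.Str.find s t ∧ PySem.Str.find s t < acc then PySem.Str.find s t else acc) ≤ PySem.Str.find s t) := by
      split_ifs with h
      · exact ⟨le_of_lt h.2, Or.inr ⟨h.1, rfl⟩, fun _ => le_refl _⟩
      · refine ⟨le_refl _, Or.inl rfl, ?_⟩
        intro h0
        by_contra hlt
        exact h ⟨h0, by omega⟩
    obtain ⟨h1, h2, h3⟩ := hstep
    obtain ⟨ih1, ih2, ih3⟩ := ih (if 0 ≤ PySem.Str.find s t ∧ PySem.Str.find s t < acc then PySem.Str.find s t else acc)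
    refine ⟨le_trans ih1 h1, ?_, ?_⟩
    · rcases ih2 with h | ⟨t', ht', h0, hr⟩
      · rw [h]
        rcases h2 with h' | ⟨h0, h'⟩
        · exact Or.inl h'
        · exact Or.inr ⟨t, List.mem_cons_self, h0, h'⟩
      · exact Or.inr ⟨t', List.mem_cons_of_mem _ ht', h0, hr⟩
    · intro t' ht' h0
      rcases List.mem_cons.mp ht' with rfl | ht'
      · exact le_trans ih1 (h3 h0)
      · exact ih3 t' ht' h0

-- B's scan: starting at i ≤ length with fuel length - i, the result r satisfies
-- i ≤ r ≤ length, no position in [i, r) hits, and r hits whenever r < length.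
theorem firstHit_spec (l : List Char) (toks : List String) :
    ∀ i, i ≤ l.length →
      i ≤ snippetAltFirstHit l toks i (l.length - i) ∧
      snippetAltFirstHit l toks i (l.length - i) ≤ l.length ∧
      (∀ j, i ≤ j → j < snippetAltFirstHit l toks i (l.length - i) →
        toks.any (fun t => t.toList.isPrefixOf (l.drop j)) = false) ∧
      (snippetAltFirstHit l toks i (l.length - i) < l.length →
        toks.any (fun t => t.toList.isPrefixOf (l.drop (snippetAltFirstHit l toks i (l.length - i)))) = true) := by
  have H : ∀ k i, i + k = l.length →
      i ≤ snippetAltFirstHit l toks i k ∧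
      snippetAltFirstHit l toks i k ≤ l.length ∧
      (∀ j, i ≤ j → j < snippetAltFirstHit l toks i k →
        toks.any (fun t => t.toList.isPrefixOf (l.drop j)) = false) ∧
      (snippetAltFirstHit l toks i k < l.length →
        toks.any (fun t => t.toList.isPrefixOf (l.drop (snippetAltFirstHit l toks i k))) = true) := by
    intro k
    induction k with
    | zero =>
      intro i hk
      rw [snippetAltFirstHit]
      exact ⟨by omega, le_refl _, fun j h1 h2 => by omega, fun h => absurd h (by omega)⟩
    | succ k ih =>
      intro i hk
      rw [snippetAltFirstHit]
      by_cases hp : toks.any (fun t => t.toList.isPrefixOf (l.drop i)) = true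
      · simp only [if_pos hp]
        exact ⟨le_refl _, by omega, fun j h1 h2 => absurd h1 (by omega), fun _ => hp⟩
      · simp only [if_neg hp]
        obtain ⟨h1, h2, h3, h4⟩ := ih (i + 1) (by omega)
        refine ⟨by omega, h2, ?_, h4⟩
        intro j hj1 hj2
        rcases Nat.eq_or_lt_of_le hj1 with rfl | hj1'
        · exact Bool.eq_false_iff.mpr hp
        · exact h3 j hj1' hj2
  intro i hi
  exact H (l.length - i) i (by omega)

-- the two best-position computations agree
theorem best_eq (body : String) (toks : List String) (hb : body ≠ "") :
    (toks.foldl (fun best t =>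
      let pos := PySem.Str.find (PySem.Str.lower body) t
      if 0 ≤ pos ∧ pos < best then pos else best) (PySem.Str.len body)) =
    ((snippetAltFirstHit (PySem.Str.lower body).toList toks 0
        (PySem.Str.lower body).toList.length : Nat) : Int) := by
  have hn : PySem.Str.len body = (body.toList.length : Int) := by simp [PySem.Str.len_eq]
  set l := (PySem.Str.lower body).toList with hl
  have hlen : l.length = body.toList.length := by
    simp [hl, PySem.Str.toList_lower, PySem.Chars.lower]
  have hNpos : 0 < body.toList.length := by
    have : body.toList ≠ [] := by
      intro h; exact hb (by rwa [← String.toList_inj, String.toList_empty])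
    exact List.length_pos_iff.mpr this
  have hfind : ∀ t : String, PySem.Str.find (PySem.Str.lower body) t = PySem.Chars.find l t.toList := by
    intro t; simp [hl]
  have hP : ∀ j : Nat, ((toks.any (fun t => t.toList.isPrefixOf (l.drop j))) = true)
      ↔ ∃ t ∈ toks, t.toList <+: l.drop j := by
    intro j
    simp [List.any_eq_true, List.isPrefixOf_iff_prefix]
  obtain ⟨hle, heq, hlb⟩ := foldA_spec (PySem.Str.lower body) toks (PySem.Str.len body)
  have hspec := firstHit_spec l toks 0 (by omega)
  simp only [Nat.sub_zero] at hspec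
  obtain ⟨-, hrle, hnohitlt, hhit⟩ := hspec
  set r := snippetAltFirstHit l toks 0 l.length with hr
  by_cases hrl : r < l.length
  · -- a hit exists: r is the least hit position, and the fold lands exactly on it
    have hPi : (toks.any (fun t => t.toList.isPrefixOf (l.drop r))) = true := hhit hrl
    have hmin : ∀ j, j < r → (toks.any (fun t => t.toList.isPrefixOf (l.drop j))) = false :=
      fun j hj => hnohitlt j (by omega) hj
    have hiN : r < body.toList.length := by omega
    obtain ⟨t0, ht0, hpre0⟩ := (hP r).mp hPi
    have hgei : ∀ t ∈ toks, 0 ≤ PySem.Str.find (PySem.Str.lower body) t →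
        (r : Int) ≤ PySem.Str.find (PySem.Str.lower body) t := by
      intro t ht h0
      by_contra hlt
      rw [hfind t] at h0 hlt
      obtain ⟨hpre, -⟩ := PySem.Chars.find_spec h0
      have hj : (PySem.Chars.find l t.toList).toNat < r := by omega
      have hfalse := hmin _ hj
      exact absurd (((hP _).mpr ⟨t, ht, hpre⟩).symm.trans hfalse) (by decide)
    have hfi : PySem.Str.find (PySem.Str.lower body) t0 = (r : Int) := by
      rw [hfind t0]
      have hinf : t0.toList <:+: l := hpre0.isInfix.trans (l.drop_suffix r).isInfix
      have h0 : 0 ≤ PySem.Chars.find l t0.toList :=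
        (PySem.Chars.find_nonneg_iff l t0.toList).mpr hinf
      obtain ⟨-, hmin'⟩ := PySem.Chars.find_spec h0
      have hle' : (PySem.Chars.find l t0.toList).toNat ≤ r := by
        by_contra hgt
        exact hmin' r (by omega) hpre0
      have hge' := hgei t0 ht0 (by rw [hfind t0]; exact h0)
      rw [hfind t0] at hge'
      omega
    have hri : (toks.foldl (fun best t =>
        let pos := PySem.Str.find (PySem.Str.lower body) t
        if 0 ≤ pos ∧ pos < best then pos else best) (PySem.Str.len body)) ≤ (r : Int) := by
      have := hlb t0 ht0 (by rw [hfi]; exact Int.natCast_nonneg r)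
      rwa [hfi] at this
    rcases heq with h | ⟨t, ht, h0, hrw⟩
    · exfalso
      rw [h, hn] at hri
      omega
    · rw [hrw]
      show PySem.Str.find (PySem.Str.lower body) t = (r : Int)
      have := hgei t ht h0
      rw [hrw] at hri
      omega
  · -- no hit anywhere: every find is negative, the fold keeps its initial value
    have hreq : r = l.length := by omega
    have hnohit : ∀ j, j < body.toList.length → ¬ ∃ t ∈ toks, t.toList <+: l.drop j := by
      intro j hj hx
      have hfalse := hnohitlt j (by omega) (by omega)
      exact absurd (((hP j).mpr hx).symm.trans hfalse) (by decide)
    have hneg : ∀ t ∈ toks, ¬ 0 ≤ PySem.Str.find (PySem.Str.lower body) t := by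
      intro t ht h0
      rw [hfind t] at h0
      obtain ⟨hpre, -⟩ := PySem.Chars.find_spec h0
      by_cases hc : (PySem.Chars.find l t.toList).toNat < body.toList.length
      · exact hnohit _ hc ⟨t, ht, hpre⟩
      · have hlel : PySem.Chars.find l t.toList ≤ (l.length : Int) :=
          PySem.Chars.find_le_length l t.toList
        have : (PySem.Chars.find l t.toList).toNat = l.length := by omega
        rw [this, List.drop_length] at hpre
        have ht0 : t.toList = [] := List.prefix_nil.mp hpre
        exact hnohit 0 hNpos ⟨t, ht, by simp [ht0]⟩
    rcases heq with h | ⟨t, ht, h0, -⟩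
    · rw [h, hreq, hn, hlen]
    · exact absurd h0 (hneg t ht)

-- the tail computations (start/stop/strip/ellipses) agree for a nonnegative best position
theorem tail_eq (body : String) (length b : Int) (h0 : 0 ≤ b) :
    (let start := max 0 (b - 80);
     let stop := min (PySem.Str.len body) (start + length);
     let chunk := PySem.Str.strip (PySem.Str.slice body (some start) (some stop));
     let chunk := if start > 0 then "…" ++ chunk else chunk;
     if stop < PySem.Str.len body then chunk ++ "…" else chunk) =
    (let n : Int := PySem.Str.len body;
     let start : Int := if b > 80 then b - 80 else 0;
     let stop : Int := if start + length < n then start + length else n;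
     (if start > 0 then "…" else "") ++
       PySem.Str.strip (PySem.Str.slice body (some start) (some stop)) ++
       (if stop < n then "…" else "")) := by
  have hs : (if b > 80 then b - 80 else 0 : Int) = max 0 (b - 80) := by
    split_ifs <;> omega
  simp only [hs]
  set start := max 0 (b - 80) with hstart
  have hm : (if start + length < PySem.Str.len body then start + length else PySem.Str.len body) =
      min (PySem.Str.len body) (start + length) := by
    split_ifs <;> omega
  simp only [hm]
  set stop := min (PySem.Str.len body) (start + length) with hstop
  set chunk := PySem.Str.strip (PySem.Str.slice body (some start) (some stop)) with hchunk
  split_ifs <;> simp [String.append_assoc]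

-- ===== VERDICT (by name: the statement is the Claim_ definition above) =====
theorem snippet_spec : Claim_equal_snippet := by
  intro body toks length _
  unfold Spec_snippet snippet snippet_alt
  by_cases hb : body = ""
  · simp [hb]
  · simp only [if_neg hb]
    refine Eq.trans (congrArg (fun b : Int =>
      let start := max 0 (b - 80)
      let stop := min (PySem.Str.len body) (start + length)
      let chunk := PySem.Str.strip (PySem.Str.slice body (some start) (some stop))
      let chunk := if start > 0 then "…" ++ chunk else chunk
      if stop < PySem.Str.len body then chunk ++ "…" else chunk) (best_eq body toks hb)) ?_
    exact tail_eq body length _ (Int.natCast_nonneg _)
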